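-- pv_equiv track=rewrite | github.com/kerBiy/ubb-computer-science | Fundamentele Programarii/lab 3/8.py | longestOnlyDigitsSubSeq
-- ===== SOURCE A (Python) =====
-- def longestOnlyDigitsSubSeq(nums: list[int]) -> list[int]:
--     max_seq, curr_seq = [], []
--
--     for num in nums:
--         if 0 <= num <= 10:
--             curr_seq.append(num)
--         else:
--             if len(curr_seq) > len(max_seq):
--                 max_seq = list(curr_seq)
--             curr_seq = []
--
--     if len(curr_seq) > len(max_seq):
--         max_seq = list(curr_seq)
--
--     return max_seq
-- ===== SOURCE B (Python) =====
-- def longestOnlyDigitsSubSeq(nums: list[int]) -> list[int]: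
--     # Phase 1: extract all maximal contiguous runs of values in [0, 10].
--     segs = []
--     i, n = 0, len(nums)
--     while i < n:
--         if 0 <= nums[i] <= 10:
--             j = i
--             while j < n and 0 <= nums[j] <= 10:
--                 j += 1
--             segs.append(nums[i:j])
--             i = j
--         else:
--             i += 1
--     # Phase 2: the first longest run (max keeps the first maximal element;
--     # the default covers the case of no runs at all).
--     return max(segs, key=len, default=[])
-- ===== Notes on version B (the rewrite author's own statement) =====
-- stated objective: alternative
-- what changed: Replaces the running max/current accumulator fold with a two-phase group-then-reduce: first extract all maximal in-range runs, then pick the first longest run with the builtin max.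
import Mathlib
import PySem

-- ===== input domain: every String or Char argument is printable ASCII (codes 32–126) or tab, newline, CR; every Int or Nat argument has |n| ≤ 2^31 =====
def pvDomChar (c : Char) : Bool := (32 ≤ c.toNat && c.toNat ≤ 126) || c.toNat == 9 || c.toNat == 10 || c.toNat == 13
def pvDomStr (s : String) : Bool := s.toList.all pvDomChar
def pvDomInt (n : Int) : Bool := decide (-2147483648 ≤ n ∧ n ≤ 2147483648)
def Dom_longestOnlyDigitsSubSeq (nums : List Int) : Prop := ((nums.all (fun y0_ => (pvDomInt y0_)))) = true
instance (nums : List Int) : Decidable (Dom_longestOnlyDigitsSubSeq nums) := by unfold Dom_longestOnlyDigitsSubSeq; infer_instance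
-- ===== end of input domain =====

-- B replaces A's running max/current accumulator fold with a two-phase
-- group-then-reduce (extract maximal in-range runs, then take the first longest);
-- objective: alternative decomposition, same asymptotic cost.

-- ===== PORT A =====
-- the for-loop over nums with state (max_seq, curr_seq); the trailing
-- 'if len(curr_seq) > len(max_seq)' is the base case of the recursion
def pvLoopA (maxSeq currSeq : List Int) : List Int → List Int
  | [] => if currSeq.length > maxSeq.length then currSeq else maxSeq
  | num :: rest =>
      if 0 ≤ num ∧ num ≤ 10 then
        pvLoopA maxSeq (currSeq ++ [num]) rest
      else
        pvLoopA (if currSeq.length > maxSeq.length then currSeq else maxSeq) [] rest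

def longestOnlyDigitsSubSeq (nums : List Int) : List Int :=
  pvLoopA [] [] nums

-- ===== PORT B =====
-- inner 'while j < n and 0 <= nums[j] <= 10' of Source B: the maximal leading
-- in-range run and the remainder of the list
def pvTakeRun : List Int → List Int × List Int
  | [] => ([], [])
  | x :: xs =>
      if 0 ≤ x ∧ x ≤ 10 then
        let p := pvTakeRun xs
        (x :: p.1, p.2)
      else ([], x :: xs)

theorem pvTakeRun_snd_le : ∀ l : List Int, (pvTakeRun l).2.length ≤ l.length
  | [] => by simp [pvTakeRun]
  | x :: xs => by
      simp only [pvTakeRun]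
      split
      · exact Nat.le_succ_of_le (pvTakeRun_snd_le xs)
      · simp

-- outer while of Source B: collect all maximal in-range runs (phase 1)
def pvSegs : List Int → List (List Int)
  | [] => []
  | x :: xs =>
      if 0 ≤ x ∧ x ≤ 10 then
        let p := pvTakeRun xs
        (x :: p.1) :: pvSegs p.2
      else pvSegs xs
termination_by l => l.length
decreasing_by
  · exact Nat.lt_succ_of_le (pvTakeRun_snd_le xs)
  · simp

-- Python's max(segs, key=len, default=[]): first element with maximal length
def pvMaxByLen : List (List Int) → List Int
  | [] => []
  | s :: rest => rest.foldl (fun b x => if x.length > b.length then x else b) s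

def longestOnlyDigitsSubSeq_alt (nums : List Int) : List Int :=
  pvMaxByLen (pvSegs nums)

-- ===== PRECONDITION & SPEC =====
def Spec_longestOnlyDigitsSubSeq (nums : List Int) (out : List Int) : Prop := out = longestOnlyDigitsSubSeq_alt nums
instance (nums : List Int) (out : List Int) : Decidable (Spec_longestOnlyDigitsSubSeq nums out) := by unfold Spec_longestOnlyDigitsSubSeq; infer_instance

-- ===== CLAIM (what is proved, stated in full; the proofs are below) =====
def Claim_equal_longestOnlyDigitsSubSeq : Prop := ∀ (nums : List Int), Dom_longestOnlyDigitsSubSeq nums → Spec_longestOnlyDigitsSubSeq nums (longestOnlyDigitsSubSeq nums)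

-- ===== LEMMAS AND PROOFS =====

-- the "better of two by length" step shared by both characterisations
def pvStep (b s : List Int) : List Int := if s.length > b.length then s else b

-- segments of the list, with a pending (possibly empty) current run c
def pvSegsP : List Int → List Int → List (List Int)
  | c, [] => if c = [] then [] else [c]
  | c, x :: xs =>
      if 0 ≤ x ∧ x ≤ 10 then pvSegsP (c ++ [x]) xs
      else if c = [] then pvSegsP [] xs else c :: pvSegsP [] xs

theorem pvLoopA_eq_foldl : ∀ (l m c : List Int),
    pvLoopA m c l = (pvSegsP c l).foldl pvStep m := by
  intro l
  induction l with
  | nil =>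
      intro m c
      by_cases hc : c = []
      · subst hc; simp [pvLoopA, pvSegsP]
      · simp [pvLoopA, pvSegsP, hc, pvStep, List.foldl]
  | cons x xs ih =>
      intro m c
      by_cases hx : 0 ≤ x ∧ x ≤ 10
      · simp [pvLoopA, pvSegsP, hx, ih]
      · by_cases hc : c = []
        · subst hc
          simp [pvLoopA, pvSegsP, hx, ih]
        · simp [pvLoopA, pvSegsP, hx, hc, ih, pvStep]

theorem pvSegsP_run : ∀ (l c : List Int), c ≠ [] →
    pvSegsP c l = (c ++ (pvTakeRun l).1) :: pvSegsP [] (pvTakeRun l).2 := by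
  intro l
  induction l with
  | nil => intro c hc; simp [pvSegsP, pvTakeRun, hc]
  | cons x xs ih =>
      intro c hc
      by_cases hx : 0 ≤ x ∧ x ≤ 10
      · have := ih (c ++ [x]) (by simp)
        simp [pvSegsP, pvTakeRun, hx, this]
      · simp [pvSegsP, pvTakeRun, hx, hc]

theorem pvSegs_eq_segsP_aux : ∀ (n : ℕ) (l : List Int), l.length ≤ n →
    pvSegs l = pvSegsP [] l := by
  intro n
  induction n with
  | zero =>
      intro l hl
      have : l = [] := List.eq_nil_of_length_eq_zero (Nat.le_zero.mp hl)
      subst this; simp [pvSegs, pvSegsP]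
  | succ n ih =>
      intro l hl
      cases l with
      | nil => simp [pvSegs, pvSegsP]
      | cons x xs =>
          by_cases hx : 0 ≤ x ∧ x ≤ 10
          · have hrest : (pvTakeRun xs).2.length ≤ n :=
              le_trans (pvTakeRun_snd_le xs) (Nat.lt_succ_iff.mp (Nat.lt_of_lt_of_le (Nat.lt_succ_of_le (le_refl _)) hl))
            have hr := pvSegsP_run xs [x] (by simp)
            simp [pvSegs, pvSegsP, hx, ih _ hrest, hr]
          · have hxs : xs.length ≤ n := Nat.lt_succ_iff.mp (Nat.lt_of_lt_of_le (Nat.lt_succ_of_le (le_refl _)) hl)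
            simp [pvSegs, pvSegsP, hx, ih _ hxs]

theorem pvSegs_eq_segsP (l : List Int) : pvSegs l = pvSegsP [] l :=
  pvSegs_eq_segsP_aux l.length l (le_refl _)

theorem pvSegsP_ne_nil : ∀ (l c : List Int),
    (c ≠ [] → ∀ s ∈ pvSegsP c l, s ≠ []) ∧ (∀ s ∈ pvSegsP [] l, s ≠ []) := by
  intro l
  induction l with
  | nil =>
      intro c
      constructor
      · intro hc s hs
        simp [pvSegsP, hc] at hs; simpa [hs] using hc
      · intro s hs; simp [pvSegsP] at hs
  | cons x xs ih =>
      intro c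
      by_cases hx : 0 ≤ x ∧ x ≤ 10
      · constructor
        · intro hc s hs
          rw [pvSegsP] at hs
          simp only [hx] at hs
          exact (ih (c ++ [x])).1 (by simp) s hs
        · intro s hs
          rw [pvSegsP] at hs
          simp only [hx, if_true, List.nil_append] at hs
          exact (ih [x]).1 (by simp) s hs
      · constructor
        · intro hc s hs
          rw [pvSegsP] at hs
          simp only [hx, if_false, hc] at hs
          rcases List.mem_cons.mp hs with h | h
          · subst h; exact hc
          · exact (ih []).2 s h
        · intro s hs
          rw [pvSegsP] at hs
          simp only [hx, if_false] at hs
          exact (ih []).2 s hs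

theorem pvMaxByLen_eq_foldl (segs : List (List Int)) (h : ∀ s ∈ segs, s ≠ []) :
    pvMaxByLen segs = segs.foldl pvStep [] := by
  cases segs with
  | nil => simp [pvMaxByLen]
  | cons s rest =>
      have hs : s ≠ [] := h s (List.mem_cons_self)
      have hlen : 0 < s.length := List.length_pos_iff.mpr hs
      show _ = List.foldl pvStep (pvStep [] s) rest
      have h1 : pvStep [] s = s := by simp [pvStep, hlen]
      have h2 : pvStep = fun b x => if x.length > b.length then x else b := rfl
      rw [h1, h2]
      rfl

-- ===== VERDICT (by name: the statement is the Claim_ definition above) =====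
theorem longestOnlyDigitsSubSeq_spec : Claim_equal_longestOnlyDigitsSubSeq := by
  intro nums _
  unfold Spec_longestOnlyDigitsSubSeq longestOnlyDigitsSubSeq longestOnlyDigitsSubSeq_alt
  rw [pvLoopA_eq_foldl, pvSegs_eq_segsP,
      pvMaxByLen_eq_foldl _ (pvSegsP_ne_nil nums []).2]
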